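-- pv_equiv track=rewrite | github.com/BartlomiejRasztabiga/AISDI | zad5/main.py | get_first_n_words
-- ===== SOURCE A (Python) =====
-- def get_first_n_words(lines, n):
--     selected_words = []
--
--     for line in lines:
--         for word in line.strip().split():
--             if len(selected_words) >= n:
--                 return " ".join(selected_words)
--             selected_words.append(word)
--
--     return " ".join(selected_words)
-- ===== SOURCE B (Python) =====
-- def get_first_n_words(lines, n):
--     remaining = n
--     result = []
--     for line in lines:
--         if remaining <= 0:
--             break
--         take = line.strip().split()[:remaining]
--         result.extend(take)
--         remaining -= len(take)
--     return " ".join(result)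
-- ===== Notes on version B (the rewrite author's own statement) =====
-- stated objective: alternative
-- what changed: Replaces the word-by-word nested loop with a per-word length check and mid-loop early return by a single countdown loop that slices each line's word list to the remaining budget and extends the result in whole chunks.
import Mathlib
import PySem

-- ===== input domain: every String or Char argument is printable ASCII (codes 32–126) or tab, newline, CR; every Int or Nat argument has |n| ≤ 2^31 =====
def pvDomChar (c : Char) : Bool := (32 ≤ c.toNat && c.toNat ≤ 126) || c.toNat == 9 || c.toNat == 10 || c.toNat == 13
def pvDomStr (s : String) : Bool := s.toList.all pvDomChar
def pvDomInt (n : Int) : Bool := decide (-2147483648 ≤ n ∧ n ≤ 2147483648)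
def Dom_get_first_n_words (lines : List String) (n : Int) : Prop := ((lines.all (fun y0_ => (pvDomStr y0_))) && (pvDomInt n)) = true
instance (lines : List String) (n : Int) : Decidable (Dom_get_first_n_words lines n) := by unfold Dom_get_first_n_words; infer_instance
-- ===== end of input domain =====

-- B replaces A's word-by-word inner loop with a length check and mid-loop early return
-- by a countdown loop that slices each line's word list to the remaining budget (alternative decomposition).

-- ===== PORT A =====
-- inner 'for word in …' loop; Sum.inr = the early 'return " ".join(selected_words)'
def pvA_inner (n : Int) (ws : List String) (acc : List String) : List String ⊕ String :=
  match ws with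
  | [] => Sum.inl acc
  | w :: rest =>
      if (acc.length : Int) ≥ n then Sum.inr (PySem.Str.join " " acc)
      else pvA_inner n rest (acc ++ [w])

-- outer 'for line in lines' loop
def pvA_lines (n : Int) (ls : List String) (acc : List String) : String :=
  match ls with
  | [] => PySem.Str.join " " acc
  | l :: rest =>
      match pvA_inner n (PySem.Str.split₀ (PySem.Str.strip l)) acc with
      | Sum.inl acc' => pvA_lines n rest acc'
      | Sum.inr s => s

def get_first_n_words (lines : List String) (n : Int) : String :=
  pvA_lines n lines []

-- ===== PORT B =====
-- countdown loop: break when remaining ≤ 0, else extend with line.strip().split()[:remaining]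
def pvB_loop (ls : List String) (remaining : Int) (result : List String) : List String :=
  match ls with
  | [] => result
  | l :: rest =>
      if remaining ≤ 0 then result
      else
        let take := PySem.List.slice (PySem.Str.split₀ (PySem.Str.strip l)) none (some remaining)
        pvB_loop rest (remaining - take.length) (result ++ take)

def get_first_n_words_alt (lines : List String) (n : Int) : String :=
  PySem.Str.join " " (pvB_loop lines n [])

-- ===== PRECONDITION & SPEC =====
def Spec_get_first_n_words (lines : List String) (n : Int) (out : String) : Prop := out = get_first_n_words_alt lines n
instance (lines : List String) (n : Int) (out : String) : Decidable (Spec_get_first_n_words lines n out) := by unfold Spec_get_first_n_words; infer_instance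

-- ===== CLAIM (what is proved, stated in full; the proofs are below) =====
def Claim_equal_get_first_n_words : Prop := ∀ (lines : List String) (n : Int), Dom_get_first_n_words lines n → Spec_get_first_n_words lines n (get_first_n_words lines n)

-- ===== LEMMAS AND PROOFS =====

-- words of one line
def pvWords (l : String) : List String := PySem.Str.split₀ (PySem.Str.strip l)

-- A's inner loop: consumes all words if they fit, else early-returns the join truncated at n
lemma pvA_inner_eq (n : Int) (ws acc : List String) :
    pvA_inner n ws acc =
      if (acc.length : Int) + ws.length ≤ n ∨ ws = [] then Sum.inl (acc ++ ws)
      else Sum.inr (PySem.Str.join " " (acc ++ ws.take (n - acc.length).toNat)) := by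
  induction ws generalizing acc with
  | nil => simp [pvA_inner]
  | cons w rest ih =>
      simp only [pvA_inner]
      by_cases hge : (acc.length : Int) ≥ n
      · have hno : ¬ ((acc.length : Int) + (w :: rest).length ≤ n ∨ w :: rest = []) := by
          simp; omega
        rw [if_pos hge, if_neg hno]
        have h0 : (n - acc.length).toNat = 0 := by omega
        simp [h0]
      · rw [if_neg hge, ih]
        by_cases hfit : (acc.length : Int) + (w :: rest).length ≤ n
        · have h1 : ((acc ++ [w]).length : Int) + rest.length ≤ n ∨ rest = [] := by
            left; simp at hfit ⊢; omega
          rw [if_pos h1, if_pos (Or.inl hfit)]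
          simp
        · have h1 : ¬ (((acc ++ [w]).length : Int) + rest.length ≤ n ∨ rest = []) := by
            push_neg
            refine ⟨?_, ?_⟩
            · simp at hfit ⊢; omega
            · intro h; subst h; simp at hfit ⊢; omega
          have h2 : ¬ ((acc.length : Int) + (w :: rest).length ≤ n ∨ w :: rest = []) := by
            simp at hfit ⊢; omega
          rw [if_neg h1, if_neg h2]
          have hk : (n - (acc ++ [w]).length).toNat = (n - acc.length).toNat - 1 := by
            simp; omega
          have hk2 : (n - acc.length).toNat = 1 + ((n - acc.length).toNat - 1) := by omega
          congr 1
          rw [hk]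
          conv_rhs => rw [hk2]
          simp [List.take_add, List.append_assoc]

lemma pvA_inner_fits (n : Int) (ws acc : List String)
    (h : (acc.length : Int) + ws.length ≤ n ∨ ws = []) :
    pvA_inner n ws acc = Sum.inl (acc ++ ws) := by
  rw [pvA_inner_eq, if_pos h]

lemma pvA_inner_over (n : Int) (ws acc : List String)
    (h : ¬ ((acc.length : Int) + ws.length ≤ n ∨ ws = [])) :
    pvA_inner n ws acc = Sum.inr (PySem.Str.join " " (acc ++ ws.take (n - acc.length).toNat)) := by
  rw [pvA_inner_eq, if_neg h]

-- A's outer loop computes the join of acc ++ (first (n − |acc|) of the remaining words),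
-- under the invariant that acc fits in the budget (or is empty)
lemma pvA_lines_eq (n : Int) (ls acc : List String)
    (hinv : (acc.length : Int) ≤ n ∨ acc = []) :
    pvA_lines n ls acc =
      PySem.Str.join " " (acc ++ (ls.flatMap pvWords).take (n - acc.length).toNat) := by
  induction ls generalizing acc with
  | nil => simp [pvA_lines]
  | cons l rest ih =>
      simp only [pvA_lines, List.flatMap_cons]
      rw [show PySem.Str.split₀ (PySem.Str.strip l) = pvWords l from rfl]
      generalize pvWords l = ws
      by_cases hc : (acc.length : Int) + ws.length ≤ n ∨ ws = []
      · rw [pvA_inner_fits n ws acc hc]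
        show pvA_lines n rest (acc ++ ws) =
          PySem.Str.join " " (acc ++ (ws ++ List.flatMap pvWords rest).take (n - acc.length).toNat)
        rcases hc with hc | hc
        · have hinv' : ((acc ++ ws).length : Int) ≤ n ∨ acc ++ ws = [] := by
            left; simp only [List.length_append]; push_cast; omega
          rw [ih _ hinv']
          rw [List.take_append,
              List.take_of_length_le (by omega : ws.length ≤ (n - (acc.length:Int)).toNat)]
          have hidx : (n - ((acc ++ ws).length : Int)).toNat
              = (n - (acc.length:Int)).toNat - ws.length := by
            simp only [List.length_append]; push_cast; omega
          rw [hidx, List.append_assoc]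
        · subst hc
          simp only [List.append_nil, List.nil_append]
          exact ih acc hinv
      · rw [pvA_inner_over n ws acc hc]
        push Not at hc
        obtain ⟨hgt, hne⟩ := hc
        have hle : (n - (acc.length:Int)).toNat ≤ ws.length := by omega
        rw [List.take_append_of_le_length hle]

-- B's loop appends the first r words of everything remaining
lemma pvB_loop_eq (ls : List String) (r : Int) (res : List String) :
    pvB_loop ls r res = res ++ (ls.flatMap pvWords).take r.toNat := by
  induction ls generalizing r res with
  | nil => simp [pvB_loop]
  | cons l rest ih =>
      simp only [pvB_loop, List.flatMap_cons]
      by_cases hr : r ≤ 0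
      · rw [if_pos hr]
        have h0 : r.toNat = 0 := by omega
        simp [h0]
      · rw [if_neg hr]
        show pvB_loop rest
            (r - ((PySem.List.slice (PySem.Str.split₀ (PySem.Str.strip l)) none (some r)).length : Int))
            (res ++ PySem.List.slice (PySem.Str.split₀ (PySem.Str.strip l)) none (some r)) = _
        rw [PySem.List.slice_to _ (by omega : (0:Int) ≤ r),
            show PySem.Str.split₀ (PySem.Str.strip l) = pvWords l from rfl]
        generalize pvWords l = ws
        rw [ih, List.take_append, List.append_assoc]
        have hlen : (r - ((ws.take r.toNat).length : Int)).toNat = r.toNat - ws.length := by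
          simp only [List.length_take]; push_cast [Int.toNat_of_nonneg (by omega : (0:Int) ≤ r)]
          omega
        rw [hlen]

-- ===== VERDICT (by name: the statement is the Claim_ definition above) =====
theorem get_first_n_words_spec : Claim_equal_get_first_n_words := by
  intro lines n _
  unfold Spec_get_first_n_words get_first_n_words get_first_n_words_alt
  rw [pvA_lines_eq n lines [] (Or.inr rfl), pvB_loop_eq]
  simp
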